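-- pv_equiv track=rewrite | github.com/miliar/Code_Jam_Webscraper | solutions_python/Problem_200/2443.py | solve
-- ===== SOURCE A (Python) =====
-- def solve(x):
--     solution = 0
--     num_digits = len(str(x))
--     c = num_digits
--     add_count = 0
--
--     while c > 0 and add_count < 9:
--         to_add = int("1" * c)
--         if solution + to_add <= x:
--             solution += to_add
--             add_count += 1
--         else:
--             c -= 1
--
--     return solution
-- ===== SOURCE B (Python) =====
-- def solve(x):
--     solution = 0
--     add_count = 0
--     for c in range(len(str(x)), 0, -1):
--         rep = int("1" * c)
--         take = max(0, min((x - solution) // rep, 9 - add_count))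
--         solution += take * rep
--         add_count += take
--     return solution
-- ===== Notes on version B (the rewrite author's own statement) =====
-- stated objective: simpler
-- what changed: Replaces the while-loop that adds one repunit at a time (re-testing the cap each round) by a single for-loop over repunit lengths that computes with one floor division how many copies of each repunit fit under both x and the remaining budget of at most nine additions.
import Mathlib
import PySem

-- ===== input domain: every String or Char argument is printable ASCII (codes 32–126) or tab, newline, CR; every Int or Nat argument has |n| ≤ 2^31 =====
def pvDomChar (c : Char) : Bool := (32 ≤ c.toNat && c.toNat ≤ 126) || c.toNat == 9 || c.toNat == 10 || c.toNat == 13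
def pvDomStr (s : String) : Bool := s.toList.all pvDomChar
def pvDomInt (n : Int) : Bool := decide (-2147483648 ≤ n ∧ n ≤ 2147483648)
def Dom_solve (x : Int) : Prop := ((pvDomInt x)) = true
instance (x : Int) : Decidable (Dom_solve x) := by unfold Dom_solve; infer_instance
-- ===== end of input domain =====

-- B replaces A's one-repunit-at-a-time while-loop by a single pass over repunit lengths
-- that takes each repunit's full count via floor division; objective: simpler.

-- ===== PORT A =====
-- int("1" * c); both programs only evaluate it with c ≥ 1, where int() succeeds (getD 0 is never the parse-failure default there)
def repunit (c : Int) : Int := (PySem.Int.ofChars? (PySem.List.pyRepeat ['1'] c)).getD 0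

-- the while-loop of A: state (solution, c, add_count)
def solveLoop (x sol : Int) (c : Nat) (addc : Int) : Int :=
  if h : 0 < c ∧ addc < 9 then
    let toAdd := repunit (c : Int)
    if sol + toAdd ≤ x then solveLoop x (sol + toAdd) c (addc + 1)
    else solveLoop x sol (c - 1) addc
  else sol
termination_by (9 - addc).toNat * 10 + c
decreasing_by
  · omega
  · omega

def solve (x : Int) : Int := solveLoop x 0 (PySem.Int.toChars x).length 0

-- ===== PORT B =====
-- one iteration of B's for-loop: state (solution, add_count)
def stepB (x : Int) (st : Int × Int) (c : Int) : Int × Int :=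
  let rep := repunit c
  let take := max 0 (min (PySem.Int.floordiv (x - st.1) rep) (9 - st.2))
  (st.1 + take * rep, st.2 + take)

def solve_alt (x : Int) : Int :=
  ((PySem.List.pyRange ((PySem.Int.toChars x).length : Int) 0 (-1)).foldl (stepB x) (0, 0)).1

-- ===== PRECONDITION & SPEC =====
def Spec_solve (x : Int) (out : Int) : Prop := out = solve_alt x
instance (x : Int) (out : Int) : Decidable (Spec_solve x out) := by unfold Spec_solve; infer_instance

-- ===== CLAIM (what is proved, stated in full; the proofs are below) =====
def Claim_equal_solve : Prop := ∀ (x : Int), Dom_solve x → Spec_solve x (solve x)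

-- ===== LEMMAS AND PROOFS =====

lemma repunit_pos : ∀ k : Nat, 1 ≤ k → k ≤ 11 → 0 < repunit (k : Int) := by
  intro k h1 h2
  interval_cases k <;> decide

lemma solveLoop_nine (x sol : Int) (c : Nat) : solveLoop x sol c 9 = sol := by
  rw [solveLoop]; norm_num

-- A's behaviour at one repunit length: it performs exactly
-- max 0 (min ((x - sol) // rep) (9 - addc)) additions of rep, then decrements c.
lemma levelStep (x : Int) (c : Nat) (hrep : 0 < repunit ((c + 1 : Nat) : Int)) :
    ∀ (n : Nat) (sol addc : Int), 0 ≤ addc → addc ≤ 9 → (9 - addc).toNat = n →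
    solveLoop x sol (c + 1) addc =
      solveLoop x
        (sol + (max 0 (min (PySem.Int.floordiv (x - sol) (repunit ((c + 1 : Nat) : Int))) (9 - addc)))
          * repunit ((c + 1 : Nat) : Int))
        c
        (addc + max 0 (min (PySem.Int.floordiv (x - sol) (repunit ((c + 1 : Nat) : Int))) (9 - addc))) := by
  intro n
  induction n with
  | zero =>
    intro sol addc h0 h9 hn
    have : addc = 9 := by omega
    subst this
    have ht : max 0 (min (PySem.Int.floordiv (x - sol) (repunit ((c + 1 : Nat) : Int))) (9 - 9)) = 0 := by
      omega
    rw [ht]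
    simp [solveLoop_nine]
  | succ n ih =>
    intro sol addc h0 h9 hn
    have haddc : addc < 9 := by omega
    set R := repunit ((c + 1 : Nat) : Int) with hR
    rw [solveLoop]
    rw [dif_pos ⟨by omega, haddc⟩]
    simp only [← hR]
    by_cases hle : sol + R ≤ x
    · rw [if_pos hle]
      rw [ih (sol + R) (addc + 1) (by omega) (by omega) (by omega)]
      obtain ⟨hb1, hb2⟩ :=
        (PySem.Int.floordiv_eq_iff_of_pos hrep
          (a := x - sol) (q := PySem.Int.floordiv (x - sol) R)).mp rfl
      set q := PySem.Int.floordiv (x - sol) R with hq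
      have hq1 : 1 ≤ q := by
        rw [hq, PySem.Int.le_floordiv_iff_mul_le hrep]; linarith
      have hq' : PySem.Int.floordiv (x - (sol + R)) R = q - 1 := by
        rw [PySem.Int.floordiv_eq_iff_of_pos hrep]
        constructor <;> nlinarith
      rw [hq']
      have ht : max 0 (min (q - 1) (9 - (addc + 1))) + 1 = max 0 (min q (9 - addc)) := by
        omega
      rw [show addc + 1 + max 0 (min (q - 1) (9 - (addc + 1)))
            = addc + max 0 (min q (9 - addc)) by omega]
      rw [show sol + R + max 0 (min (q - 1) (9 - (addc + 1))) * R
            = sol + max 0 (min q (9 - addc)) * R by rw [← ht]; ring]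
    · rw [if_neg hle]
      have hq0 : PySem.Int.floordiv (x - sol) R < 1 := by
        rw [PySem.Int.floordiv_lt_iff_lt_mul hrep]; linarith
      have ht : max 0 (min (PySem.Int.floordiv (x - sol) R) (9 - addc)) = 0 := by omega
      rw [ht]
      simp

lemma key (x : Int) : ∀ (c : Nat) (sol addc : Int), 0 ≤ addc → addc ≤ 9 →
    (∀ k : Nat, 1 ≤ k → k ≤ c → 0 < repunit (k : Int)) →
    solveLoop x sol c addc =
      ((PySem.List.pyRange (c : Int) 0 (-1)).foldl (stepB x) (sol, addc)).1 := by
  intro c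
  induction c with
  | zero =>
    intro sol addc h0 h9 _
    rw [PySem.List.pyRange_neg_one_eq_nil (by norm_num)]
    rw [solveLoop]
    norm_num
  | succ c ih =>
    intro sol addc h0 h9 hpos
    have hrep : 0 < repunit ((c + 1 : Nat) : Int) := hpos (c + 1) (by omega) (by omega)
    rw [PySem.List.pyRange_neg_one_cons (a := ((c + 1 : Nat) : Int)) (by push_cast; omega)]
    rw [List.foldl_cons]
    have hhead : stepB x (sol, addc) ((c + 1 : Nat) : Int)
        = (sol + (max 0 (min (PySem.Int.floordiv (x - sol) (repunit ((c + 1 : Nat) : Int))) (9 - addc)))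
            * repunit ((c + 1 : Nat) : Int),
           addc + max 0 (min (PySem.Int.floordiv (x - sol) (repunit ((c + 1 : Nat) : Int))) (9 - addc))) := by
      simp [stepB]
    set t := max 0 (min (PySem.Int.floordiv (x - sol) (repunit ((c + 1 : Nat) : Int))) (9 - addc)) with htdef
    have ht0 : 0 ≤ t := by omega
    have ht9 : t ≤ 9 - addc := by omega
    rw [levelStep x c hrep (9 - addc).toNat sol addc h0 h9 rfl]
    rw [← htdef]
    rw [show (((c + 1 : Nat) : Int) - 1) = ((c : Nat) : Int) by push_cast; ring]
    rw [ih (sol + t * repunit ((c + 1 : Nat) : Int)) (addc + t) (by omega) (by omega)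
        (fun k hk1 hk2 => hpos k hk1 (by omega))]
    rw [hhead]

lemma len_toChars_le (x : Int) (h : Dom_solve x) : (PySem.Int.toChars x).length ≤ 11 := by
  have hx : -2147483648 ≤ x ∧ x ≤ 2147483648 := by
    simpa [Dom_solve, pvDomInt] using h
  unfold PySem.Int.toChars
  split
  · have h10 : (Nat.toDigits 10 x.natAbs).length ≤ 10 := by
      rw [Nat.length_toDigits_le_iff (by norm_num) (by norm_num)]
      omega
    simp only [List.length_cons]
    omega
  · have h10 : (Nat.toDigits 10 x.toNat).length ≤ 10 := by
      rw [Nat.length_toDigits_le_iff (by norm_num) (by norm_num)]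
      omega
    omega

-- ===== VERDICT (by name: the statement is the Claim_ definition above) =====
theorem solve_spec : Claim_equal_solve := by
  intro x hdom
  unfold Spec_solve solve solve_alt
  exact key x (PySem.Int.toChars x).length 0 0 (by norm_num) (by norm_num)
    (fun k h1 h2 => repunit_pos k h1 (le_trans h2 (len_toChars_le x hdom)))
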